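-- pv_equiv track=rewrite | github.com/britsingh20-source/tamilnewsbotlive | tamil-news-bot-github_3/tamil-news-bot/scripts/4_create_video.py | split_segs
-- ===== SOURCE A (Python) =====
-- def split_segs(text, n):
--     if n <= 1:
--         return [text]
--     words = text.split()
--     if not words:
--         return [text] * n
--     chunk = max(1, len(words) // n)
--     segs  = []
--     for i in range(n):
--         start = i * chunk
--         end   = start + chunk if i < n - 1 else len(words)
--         segs.append(" ".join(words[start:end]))
--     return segs
-- ===== SOURCE B (Python) =====
-- def split_segs(text, n):
--     if n <= 1:
--         return [text]
--     words = text.split()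
--     if not words:
--         return [text] * n
--     chunk = max(1, len(words) // n)
--     buckets = [[] for _ in range(n)]
--     for j, w in enumerate(words):
--         buckets[min(j // chunk, n - 1)].append(w)
--     return [" ".join(b) for b in buckets]
-- ===== Notes on version B (the rewrite author's own statement) =====
-- stated objective: alternative
-- what changed: Replaces A's per-segment loop over range(n) that slices words[i*chunk:end] by a single distributing pass over the words, sending word j into bucket min(j // chunk, n - 1) and joining the n buckets at the end.
import Mathlib
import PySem

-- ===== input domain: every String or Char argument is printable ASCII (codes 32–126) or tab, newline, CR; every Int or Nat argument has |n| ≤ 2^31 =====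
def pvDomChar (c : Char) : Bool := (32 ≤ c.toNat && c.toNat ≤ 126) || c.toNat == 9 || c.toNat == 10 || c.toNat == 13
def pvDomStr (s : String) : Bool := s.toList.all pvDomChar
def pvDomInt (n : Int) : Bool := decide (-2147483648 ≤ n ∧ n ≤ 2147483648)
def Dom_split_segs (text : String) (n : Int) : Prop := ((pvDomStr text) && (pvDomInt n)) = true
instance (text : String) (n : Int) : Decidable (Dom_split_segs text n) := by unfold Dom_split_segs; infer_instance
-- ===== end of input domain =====

-- B replaces A's per-segment index-slicing loop over range(n) by a single distributing pass
-- over the words (bucket j ↦ min(j // chunk, n-1)); return values proved equal on all inputs.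

-- ===== PORT A =====
def split_segs (text : String) (n : Int) : List String :=
  if n ≤ 1 then [text]
  else
    let words := PySem.Str.split₀ text
    if words = [] then List.replicate n.toNat text   -- [text] * n, n ≥ 2 here
    else
      let chunk := max 1 (PySem.Int.floordiv (words.length : Int) n)
      (PySem.List.pyRange 0 n 1).foldl (fun segs i =>
        let start := i * chunk
        let e := if i < n - 1 then start + chunk else (words.length : Int)
        segs ++ [PySem.Str.join " " (PySem.List.slice words (some start) (some e))]) []

-- ===== PORT B =====
def split_segs_alt (text : String) (n : Int) : List String :=
  if n ≤ 1 then [text]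
  else
    let words := PySem.Str.split₀ text
    if words = [] then List.replicate n.toNat text   -- [text] * n, n ≥ 2 here
    else
      -- j, chunk and n-1 are all nonnegative here, so Python's j // chunk and
      -- min(j // chunk, n - 1) are exactly these Nat operations
      let chunk := (max 1 (PySem.Int.floordiv (words.length : Int) n)).toNat
      let buckets := words.zipIdx.foldl
        (fun (bs : List (List String)) wj =>
          bs.set (min (wj.2 / chunk) (n.toNat - 1))
            (bs.getD (min (wj.2 / chunk) (n.toNat - 1)) [] ++ [wj.1]))
        (List.replicate n.toNat [])
      buckets.map (fun b => PySem.Str.join " " b)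

-- ===== PRECONDITION & SPEC =====
def Spec_split_segs (text : String) (n : Int) (out : List String) : Prop := out = split_segs_alt text n
instance (text : String) (n : Int) (out : List String) : Decidable (Spec_split_segs text n out) := by unfold Spec_split_segs; infer_instance

-- ===== CLAIM (what is proved, stated in full; the proofs are below) =====
def Claim_equal_split_segs : Prop := ∀ (text : String) (n : Int), Dom_split_segs text n → Spec_split_segs text n (split_segs text n)

-- ===== LEMMAS AND PROOFS =====

lemma getD_set' (l : List (List String)) (k i : Nat) (v : List String) :
    (l.set k v).getD i [] = if k = i ∧ k < l.length then v else l.getD i [] := by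
  simp only [List.getD, List.getElem?_set]
  split_ifs <;> simp_all
  omega

lemma foldl_set_length (f : Nat → Nat) :
    ∀ (ps : List (String × Nat)) (B : List (List String)),
      (ps.foldl (fun bs wj => bs.set (f wj.2) (bs.getD (f wj.2) [] ++ [wj.1])) B).length
        = B.length := by
  intro ps
  induction ps with
  | nil => intro B; rfl
  | cons p ps ih => intro B; rw [List.foldl_cons, ih, List.length_set]

lemma foldl_set_getD (f : Nat → Nat) (i : Nat) :
    ∀ (ps : List (String × Nat)) (B : List (List String)), (∀ wj ∈ ps, f wj.2 < B.length) →
      (ps.foldl (fun bs wj => bs.set (f wj.2) (bs.getD (f wj.2) [] ++ [wj.1])) B).getD i []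
        = B.getD i [] ++ ps.filterMap (fun wj => if f wj.2 = i then some wj.1 else none) := by
  intro ps
  induction ps with
  | nil => intro B _; simp
  | cons p ps ih =>
    intro B h
    have hfp : f p.2 < B.length := h p (by simp)
    have hlen : (B.set (f p.2) (B.getD (f p.2) [] ++ [p.1])).length = B.length :=
      List.length_set
    rw [List.foldl_cons, List.filterMap_cons,
      ih _ (by intro wj hm; rw [hlen]; exact h wj (by simp [hm])), getD_set']
    by_cases hpi : f p.2 = i
    · subst hpi; simp [hfp]
    · simp [hpi]

lemma filterMap_zipIdx_interval (a b : Nat) :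
    ∀ (ws : List String) (j0 : Nat),
      (ws.zipIdx j0).filterMap (fun wj => if a ≤ wj.2 ∧ wj.2 < b then some wj.1 else none)
        = (ws.take (b - j0)).drop (a - j0) := by
  intro ws
  induction ws with
  | nil => intro j0; simp
  | cons w ws ih =>
    intro j0
    rw [List.zipIdx_cons, List.filterMap_cons]
    by_cases hb : j0 < b
    · have hbe : b - j0 = (b - (j0 + 1)) + 1 := by omega
      rw [hbe, List.take_succ_cons]
      by_cases ha : a ≤ j0
      · have h0 : a - j0 = 0 := by omega
        have h1 : a - (j0 + 1) = 0 := by omega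
        simp [ha, hb, ih, h0, h1]
      · have h2 : a - j0 = (a - (j0 + 1)) + 1 := by omega
        simp only [if_neg (by omega : ¬(a ≤ j0 ∧ j0 < b)), ih, h2, List.drop_succ_cons]
    · have h3 : b - j0 = 0 := by omega
      have h4 : b - (j0 + 1) = 0 := by omega
      simp [if_neg (by omega : ¬(a ≤ j0 ∧ j0 < b)), ih, h3, h4]

lemma list_eq_map_getD (l : List (List String)) (N : Nat) (h : l.length = N) :
    l = (List.range N).map (fun i => l.getD i []) := by
  apply List.ext_getElem (by simp [h])
  intro i h1 h2
  simp [List.getD, h1]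

lemma main_eq (text : String) (n : Int) (hn : 1 < n)
    (hw : PySem.Str.split₀ text ≠ []) : split_segs text n = split_segs_alt text n := by
  simp only [split_segs, split_segs_alt, if_neg (by omega : ¬ n ≤ 1), if_neg hw]
  set words := PySem.Str.split₀ text with hwords
  set L := words.length with hLdef
  have hL : 1 ≤ L := List.length_pos_of_ne_nil hw
  set N := n.toNat with hN
  have hNn : (N : Int) = n := Int.toNat_of_nonneg (by omega)
  have hN2 : 2 ≤ N := by omega
  set c := max 1 (L / N) with hcdef
  have hc0 : 0 < c := by omega
  have hchunk : max 1 (PySem.Int.floordiv (L : Int) n) = (c : Int) := by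
    rw [← hNn, PySem.Int.floordiv_natCast, hcdef]
    push_cast
    omega
  have hrange : PySem.List.pyRange 0 n 1 = (List.range N).map (fun k : Nat => (k : Int)) := by
    rw [← hNn]; exact PySem.List.pyRange_zero_natCast N
  rw [hchunk, Int.toNat_natCast, hrange, List.foldl_map, PySem.List.foldl_append_singleton_eq_map,
    List.nil_append]
  -- the B-side buckets
  have hNsub : n.toNat - 1 = N - 1 := by omega
  rw [hNsub]
  set f : Nat → Nat := fun j => min (j / c) (N - 1) with hf
  have hblen :
      (words.zipIdx.foldl
        (fun bs wj => bs.set (f wj.2) (bs.getD (f wj.2) [] ++ [wj.1]))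
        (List.replicate N [])).length = N := by
    rw [foldl_set_length f, List.length_replicate]
  rw [list_eq_map_getD _ N hblen, List.map_map]
  apply List.map_congr_left
  intro i hi
  have hiN : i < N := List.mem_range.mp hi
  simp only [Function.comp_apply]
  rw [foldl_set_getD f i _ _ (by intro wj _; simp [hf]; omega)]
  have hrep : (List.replicate N ([] : List String)).getD i [] = [] := by simp
  rw [hrep, List.nil_append]
  -- characterise bucket membership as an index interval
  set b : Nat := if i < N - 1 then i * c + c else L with hbdef
  have hkey : ∀ wj : String × Nat, wj ∈ words.zipIdx →
      (if f wj.2 = i then some wj.1 else none)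
        = (if i * c ≤ wj.2 ∧ wj.2 < b then some wj.1 else none) := by
    rintro ⟨w, j⟩ hm
    have hj : j < L := ((List.mem_zipIdx hm).2.1).trans_eq (by omega)
    have h1 : i ≤ j / c ↔ i * c ≤ j := Nat.le_div_iff_mul_le hc0
    have h2 : j / c < i + 1 ↔ j < (i + 1) * c := Nat.div_lt_iff_lt_mul hc0
    have h3 : N - 1 ≤ j / c ↔ (N - 1) * c ≤ j := Nat.le_div_iff_mul_le hc0
    have hcond : (f j = i) ↔ (i * c ≤ j ∧ j < b) := by
      simp only [hf, hbdef]
      by_cases hi' : i < N - 1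
      · rw [if_pos hi']
        have h4 : (i + 1) * c = i * c + c := by ring
        rw [h4] at h2
        generalize j / c = q at h1 h2
        generalize i * c = m at h1 h2 ⊢
        omega
      · have hie : i = N - 1 := by omega
        subst hie
        rw [if_neg hi']
        generalize j / c = q at h3
        generalize (N - 1) * c = m at h3 ⊢
        omega
    simp only [hcond]
  rw [List.filterMap_congr hkey, filterMap_zipIdx_interval, Nat.sub_zero, Nat.sub_zero,
    List.drop_take]
  -- now match A's slice
  by_cases hi' : i < N - 1
  · rw [if_pos (show (i : Int) < n - 1 by omega)]
    have hcast : (i : Int) * (c : Int) = ((i * c : Nat) : Int) := by push_cast; ring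
    have hcast2 : (i : Int) * (c : Int) + (c : Int) = ((i * c + c : Nat) : Int) := by
      push_cast; ring
    rw [hcast2, hcast, PySem.List.slice_natCast, hbdef, if_pos hi']
  · rw [if_neg (show ¬ (i : Int) < n - 1 by omega)]
    have hcast : (i : Int) * (c : Int) = ((i * c : Nat) : Int) := by push_cast; ring
    rw [hcast, hLdef, show (words.length : Int) = ((words.length : Nat) : Int) from rfl,
      PySem.List.slice_natCast, hbdef, if_neg hi']

-- ===== VERDICT (by name: the statement is the Claim_ definition above) =====
theorem split_segs_spec : Claim_equal_split_segs := by
  intro text n _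
  unfold Spec_split_segs
  by_cases h1 : n ≤ 1
  · simp [split_segs, split_segs_alt, h1]
  · by_cases hw : PySem.Str.split₀ text = []
    · simp [split_segs, split_segs_alt, h1, hw]
    · exact main_eq text n (by omega) hw
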